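-- pv_equiv track=rewrite | github.com/omrisapir1/ADV | src/evaluation.py | filter_and_select_mixed
-- ===== SOURCE A (Python) =====
-- from typing import List, Dict, Any, Optional, Tuple
--
-- def filter_and_select_mixed(
--     questions: List[str],
--     gold_answers: List[str],
--     candidate_texts: List[List[str]],
--     candidate_valid_flags: List[List[int]],
--     correctness: List[List[int]],
-- ) -> Tuple[List[str], List[str], List[List[str]], List[List[int]]]:
--     """Replicated from train.py. Remove invalid-but-correct candidates and retain only questions
--     that have mixed correctness (contain both 0 and 1). Returns filtered sets or empty lists if none remain."""
--     filtered_candidate_texts: List[List[str]] = []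
--     filtered_correctness: List[List[int]] = []
--     for texts_row, flags_row, corr_row in zip(candidate_texts, candidate_valid_flags, correctness):
--         new_texts: List[str] = []
--         new_corr: List[int] = []
--         for t, f, corr in zip(texts_row, flags_row, corr_row):
--             if corr == -1 or (f == 0 and corr == 1):
--                 continue
--             new_texts.append(t)
--             new_corr.append(corr)
--         filtered_candidate_texts.append(new_texts)
--         filtered_correctness.append(new_corr)
--
--     mixed_indices: List[int] = []
--     for i, row in enumerate(filtered_correctness):
--         vals = set(row)
--         if 1 in vals and 0 in vals:
--             mixed_indices.append(i)
--     if not mixed_indices: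
--         return [], [], [], []
--
--     questions_f = [questions[i] for i in mixed_indices]
--     gold_answers_f = [gold_answers[i] for i in mixed_indices]
--     candidates_f = [filtered_candidate_texts[i] for i in mixed_indices]
--     correctness_f = [filtered_correctness[i] for i in mixed_indices]
--     return questions_f, gold_answers_f, candidates_f, correctness_f
-- ===== SOURCE B (Python) =====
-- from typing import List, Tuple
--
-- def filter_and_select_mixed(
--     questions: List[str],
--     gold_answers: List[str],
--     candidate_texts: List[List[str]],
--     candidate_valid_flags: List[List[int]],
--     correctness: List[List[int]],
-- ) -> Tuple[List[str], List[str], List[List[str]], List[List[int]]]: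
--     """One fused pass over the five zipped lists: filter each row's candidates,
--     keep the row only if the surviving correctness values contain both 0 and 1."""
--     questions_f: List[str] = []
--     gold_answers_f: List[str] = []
--     candidates_f: List[List[str]] = []
--     correctness_f: List[List[int]] = []
--     for q, g, texts, flags, corr in zip(
--         questions, gold_answers, candidate_texts, candidate_valid_flags, correctness
--     ):
--         kept = [
--             (t, c)
--             for t, f, c in zip(texts, flags, corr)
--             if c != -1 and not (f == 0 and c == 1)
--         ]
--         new_corr = [c for _, c in kept]
--         if 0 in new_corr and 1 in new_corr:
--             questions_f.append(q)
--             gold_answers_f.append(g)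
--             candidates_f.append([t for t, _ in kept])
--             correctness_f.append(new_corr)
--     return questions_f, gold_answers_f, candidates_f, correctness_f
-- ===== Notes on version B (the rewrite author's own statement) =====
-- stated objective: simpler
-- what changed: A builds filtered rows in one pass, collects mixed row indices with a set in a second pass, then materialises four lists by indexing questions/gold_answers/filtered lists (with an early [],[],[],[] return); B is one fused pass over the five zipped lists that filters each row and appends the four outputs directly when the surviving correctness values contain both 0 and 1, with no index lists and no early-return branch.
import Mathlib
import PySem

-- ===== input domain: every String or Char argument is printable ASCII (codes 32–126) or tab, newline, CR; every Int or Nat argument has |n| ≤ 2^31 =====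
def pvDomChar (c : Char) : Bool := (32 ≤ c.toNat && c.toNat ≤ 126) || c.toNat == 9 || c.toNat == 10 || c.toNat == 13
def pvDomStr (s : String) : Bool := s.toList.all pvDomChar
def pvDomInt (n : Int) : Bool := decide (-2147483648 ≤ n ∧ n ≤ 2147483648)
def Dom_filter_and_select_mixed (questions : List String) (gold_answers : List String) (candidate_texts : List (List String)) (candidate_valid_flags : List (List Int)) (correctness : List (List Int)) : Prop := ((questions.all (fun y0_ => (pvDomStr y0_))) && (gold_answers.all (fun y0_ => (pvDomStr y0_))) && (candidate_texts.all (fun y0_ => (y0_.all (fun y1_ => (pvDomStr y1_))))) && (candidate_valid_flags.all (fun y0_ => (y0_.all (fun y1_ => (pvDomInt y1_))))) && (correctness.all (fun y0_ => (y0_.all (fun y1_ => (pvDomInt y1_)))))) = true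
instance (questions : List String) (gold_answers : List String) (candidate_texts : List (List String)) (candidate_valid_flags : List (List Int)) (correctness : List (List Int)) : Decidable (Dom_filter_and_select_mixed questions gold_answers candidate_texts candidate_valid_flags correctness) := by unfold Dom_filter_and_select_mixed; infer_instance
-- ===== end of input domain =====

-- B fuses A's three phases (row filtering, mixed-index collection, index-based selection)
-- into one pass over the five zipped lists, appending the four outputs directly; objective: simpler.

-- ===== PORT A =====
-- Literal port of A. The comprehensions `questions[i]`/`gold_answers[i]` raise IndexError when a
-- mixed index falls beyond those lists; exactly those inputs are excluded by Pre_ below, so the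
-- `.getD` defaults are never reached on admitted inputs.
def filter_and_select_mixed (questions : List String) (gold_answers : List String) (candidate_texts : List (List String)) (candidate_valid_flags : List (List Int)) (correctness : List (List Int)) : List String × List String × List (List String) × List (List Int) :=
  let filtered :=
    (candidate_texts.zip (candidate_valid_flags.zip correctness)).foldl
      (fun (acc : List (List String) × List (List Int)) row =>
        let inner :=
          (row.1.zip (row.2.1.zip row.2.2)).foldl
            (fun (nacc : List String × List Int) tfc =>
              if tfc.2.2 = -1 ∨ (tfc.2.1 = 0 ∧ tfc.2.2 = 1) then nacc
              else (nacc.1 ++ [tfc.1], nacc.2 ++ [tfc.2.2])) ([], [])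
        (acc.1 ++ [inner.1], acc.2 ++ [inner.2])) ([], [])
  let mixed_indices :=
    (PySem.List.enumerate filtered.2 0).foldl
      (fun (acc : List Int) ir =>
        let vals := PySem.Set.ofList ir.2
        if (1 : Int) ∈ vals ∧ (0 : Int) ∈ vals then acc ++ [ir.1] else acc) []
  if mixed_indices = [] then ([], [], [], [])
  else
    (mixed_indices.map (fun i => (PySem.List.pyGet? questions i).getD ""),
     mixed_indices.map (fun i => (PySem.List.pyGet? gold_answers i).getD ""),
     mixed_indices.map (fun i => (PySem.List.pyGet? filtered.1 i).getD []),
     mixed_indices.map (fun i => (PySem.List.pyGet? filtered.2 i).getD []))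

-- ===== PORT B =====
def filter_and_select_mixed_alt (questions : List String) (gold_answers : List String) (candidate_texts : List (List String)) (candidate_valid_flags : List (List Int)) (correctness : List (List Int)) : List String × List String × List (List String) × List (List Int) :=
  (questions.zip (gold_answers.zip (candidate_texts.zip (candidate_valid_flags.zip correctness)))).foldl
    (fun (acc : List String × List String × List (List String) × List (List Int))
         (row : String × String × List String × List Int × List Int) =>
      let kept :=
        (row.2.2.1.zip (row.2.2.2.1.zip row.2.2.2.2)).filter
          (fun tfc => decide (tfc.2.2 ≠ -1 ∧ ¬(tfc.2.1 = 0 ∧ tfc.2.2 = 1)))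
      let new_corr := kept.map (fun tc => tc.2.2)
      if (0 : Int) ∈ new_corr ∧ (1 : Int) ∈ new_corr then
        (acc.1 ++ [row.1], acc.2.1 ++ [row.2.1],
         acc.2.2.1 ++ [kept.map (fun tc => tc.1)], acc.2.2.2 ++ [new_corr])
      else acc)
    ([], [], [], [])

-- ===== PRECONDITION & SPEC =====
-- Helpers for Pre_ (independent of both ports): the correctness values a row keeps,
-- and whether a row is mixed after filtering.
def pvKeptCorr (r : List String × List Int × List Int) : List Int :=
  ((r.1.zip (r.2.1.zip r.2.2)).filter
    (fun tfc => decide (tfc.2.2 ≠ -1 ∧ ¬(tfc.2.1 = 0 ∧ tfc.2.2 = 1)))).map (fun tfc => tfc.2.2)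
def pvMixedRow (r : List String × List Int × List Int) : Bool :=
  decide ((0 : Int) ∈ pvKeptCorr r ∧ (1 : Int) ∈ pvKeptCorr r)
-- Pre_ excludes exactly the inputs on which A raises IndexError: a candidate row lying beyond
-- the end of questions or gold_answers that is mixed after filtering would be indexed by A.
def Pre_filter_and_select_mixed (questions : List String) (gold_answers : List String) (candidate_texts : List (List String)) (candidate_valid_flags : List (List Int)) (correctness : List (List Int)) : Prop :=
  (((candidate_texts.zip (candidate_valid_flags.zip correctness)).drop
      (min questions.length gold_answers.length)).all (fun r => !pvMixedRow r)) = true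
instance (questions : List String) (gold_answers : List String) (candidate_texts : List (List String)) (candidate_valid_flags : List (List Int)) (correctness : List (List Int)) : Decidable (Pre_filter_and_select_mixed questions gold_answers candidate_texts candidate_valid_flags correctness) := by unfold Pre_filter_and_select_mixed; infer_instance
def pvWitness_filter_and_select_mixed : List String × List String × List (List String) × List (List Int) × List (List Int) :=
  (["q1", "q2"], ["a1", "a2"], [["t", "u"], ["v"]], [[1, 0], [1]], [[0, 1], [1]])
def Spec_filter_and_select_mixed (questions : List String) (gold_answers : List String) (candidate_texts : List (List String)) (candidate_valid_flags : List (List Int)) (correctness : List (List Int)) (out : List String × List String × List (List String) × List (List Int)) : Prop := out = filter_and_select_mixed_alt questions gold_answers candidate_texts candidate_valid_flags correctness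
instance (questions : List String) (gold_answers : List String) (candidate_texts : List (List String)) (candidate_valid_flags : List (List Int)) (correctness : List (List Int)) (out : List String × List String × List (List String) × List (List Int)) : Decidable (Spec_filter_and_select_mixed questions gold_answers candidate_texts candidate_valid_flags correctness out) := by unfold Spec_filter_and_select_mixed; infer_instance

-- ===== CLAIM (what is proved, stated in full; the proofs are below) =====
def Claim_equal_filter_and_select_mixed : Prop := ∀ (questions : List String) (gold_answers : List String) (candidate_texts : List (List String)) (candidate_valid_flags : List (List Int)) (correctness : List (List Int)), Dom_filter_and_select_mixed questions gold_answers candidate_texts candidate_valid_flags correctness → Pre_filter_and_select_mixed questions gold_answers candidate_texts candidate_valid_flags correctness → Spec_filter_and_select_mixed questions gold_answers candidate_texts candidate_valid_flags correctness (filter_and_select_mixed questions gold_answers candidate_texts candidate_valid_flags correctness)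

-- ===== LEMMAS AND PROOFS =====
-- kept texts of a row (the companion of pvKeptCorr)
def pvKeptTexts (r : List String × List Int × List Int) : List String :=
  ((r.1.zip (r.2.1.zip r.2.2)).filter
    (fun tfc => decide (tfc.2.2 ≠ -1 ∧ ¬(tfc.2.1 = 0 ∧ tfc.2.2 = 1)))).map (fun tfc => tfc.1)

-- A's inner foldl is the filter/map decomposition
theorem pv_inner_eq (l : List (String × Int × Int)) (acc : List String × List Int) :
    l.foldl
      (fun (nacc : List String × List Int) tfc =>
        if tfc.2.2 = -1 ∨ (tfc.2.1 = 0 ∧ tfc.2.2 = 1) then nacc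
        else (nacc.1 ++ [tfc.1], nacc.2 ++ [tfc.2.2])) acc
    = (acc.1 ++ (l.filter (fun tfc => decide (tfc.2.2 ≠ -1 ∧ ¬(tfc.2.1 = 0 ∧ tfc.2.2 = 1)))).map (fun tfc => tfc.1),
       acc.2 ++ (l.filter (fun tfc => decide (tfc.2.2 ≠ -1 ∧ ¬(tfc.2.1 = 0 ∧ tfc.2.2 = 1)))).map (fun tfc => tfc.2.2)) := by
  induction l generalizing acc with
  | nil => simp
  | cons x xs ih =>
    simp only [List.foldl_cons, List.filter_cons]
    by_cases h : x.2.2 = -1 ∨ (x.2.1 = 0 ∧ x.2.2 = 1)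
    · have hx : (decide (x.2.2 ≠ -1 ∧ ¬(x.2.1 = 0 ∧ x.2.2 = 1))) = false := by
        simp only [decide_eq_false_iff_not]; tauto
      rw [if_pos h, hx]
      simpa using ih acc
    · have hx : (decide (x.2.2 ≠ -1 ∧ ¬(x.2.1 = 0 ∧ x.2.2 = 1))) = true := by
        simp only [decide_eq_true_eq]; tauto
      rw [if_neg h, hx]
      simp only [if_pos, List.map_cons]
      rw [ih]
      simp [List.append_assoc]

-- A's outer foldl builds the two row-wise maps
theorem pv_outer_eq (rows : List (List String × List Int × List Int))
    (acc : List (List String) × List (List Int)) :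
    rows.foldl
      (fun (acc : List (List String) × List (List Int)) row =>
        let inner :=
          (row.1.zip (row.2.1.zip row.2.2)).foldl
            (fun (nacc : List String × List Int) tfc =>
              if tfc.2.2 = -1 ∨ (tfc.2.1 = 0 ∧ tfc.2.2 = 1) then nacc
              else (nacc.1 ++ [tfc.1], nacc.2 ++ [tfc.2.2])) ([], [])
        (acc.1 ++ [inner.1], acc.2 ++ [inner.2])) acc
    = (acc.1 ++ rows.map pvKeptTexts, acc.2 ++ rows.map pvKeptCorr) := by
  induction rows generalizing acc with
  | nil => simp
  | cons r rs ih =>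
    simp only [List.foldl_cons]
    rw [pv_inner_eq (r.1.zip (r.2.1.zip r.2.2)) ([], [])]
    rw [ih]
    simp [pvKeptTexts, pvKeptCorr, List.append_assoc]

-- enumerate of a map
theorem pv_enumerate_map {α β : Type} (f : α → β) (l : List α) (s : Int) :
    PySem.List.enumerate (l.map f) s = (PySem.List.enumerate l s).map (fun p => (p.1, f p.2)) := by
  induction l generalizing s with
  | nil => simp [PySem.List.enumerate]
  | cons x xs ih => simp [PySem.List.enumerate_cons, ih]

-- enumerate with a shifted start
theorem pv_enumerate_shift {α : Type} (l : List α) (s : Int) :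
    PySem.List.enumerate l s = (PySem.List.enumerate l 0).map (fun p => (p.1 + s, p.2)) := by
  induction l generalizing s with
  | nil => simp [PySem.List.enumerate]
  | cons x xs ih =>
    simp only [PySem.List.enumerate_cons, ih (s + 1), ih (0 + 1), List.map_cons, List.map_map]
    refine congrArg₂ List.cons (by simp) ?_
    apply List.map_congr_left
    intro p _
    simp only [Function.comp_apply, Prod.mk.injEq]
    exact ⟨by omega, trivial⟩

-- members of (enumerate l 0) have a Nat first component
theorem pv_enum_fst_nat {α : Type} (l : List α) (p : Int × α)
    (hp : p ∈ PySem.List.enumerate l 0) : ∃ k : Nat, p.1 = (k : Int) := by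
  rw [PySem.List.mem_enumerate_iff] at hp
  obtain ⟨k, hk, rfl⟩ := hp
  exact ⟨k, by simp⟩

-- A's mixed-index foldl in filter/map form
theorem pv_mixedfold (rows : List (List String × List Int × List Int)) :
    (PySem.List.enumerate (rows.map pvKeptCorr) 0).foldl
      (fun (acc : List Int) ir =>
        let vals := PySem.Set.ofList ir.2
        if (1 : Int) ∈ vals ∧ (0 : Int) ∈ vals then acc ++ [ir.1] else acc) []
    = ((PySem.List.enumerate rows 0).filter (fun ir => pvMixedRow ir.2)).map (fun ir => ir.1) := by
  rw [pv_enumerate_map, List.foldl_map]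
  rw [List.foldl_ext _
    (fun (acc : List Int) (ir : Int × (List String × List Int × List Int)) =>
      if (fun (ir : Int × (List String × List Int × List Int)) => pvMixedRow ir.2) ir = true
      then acc ++ [(fun (ir : Int × (List String × List Int × List Int)) => ir.1) ir] else acc)
    [] ?_]
  · exact (PySem.List.foldl_append_if _ _ _ []).trans (List.nil_append _)
  · intro acc p _
    by_cases h0 : (0 : Int) ∈ pvKeptCorr p.2 <;> by_cases h1 : (1 : Int) ∈ pvKeptCorr p.2 <;>
      simp [pvMixedRow, PySem.Set.mem_ofList, h0, h1]

-- A's result in selection form / B's result in zip form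
def pvSelA (rows : List (List String × List Int × List Int)) (qs gs : List String) :
    List String × List String × List (List String) × List (List Int) :=
  let sel := (PySem.List.enumerate rows 0).filter (fun ir => pvMixedRow ir.2)
  (sel.map (fun ir => (PySem.List.pyGet? qs ir.1).getD ""),
   sel.map (fun ir => (PySem.List.pyGet? gs ir.1).getD ""),
   sel.map (fun ir => (PySem.List.pyGet? (rows.map pvKeptTexts) ir.1).getD []),
   sel.map (fun ir => (PySem.List.pyGet? (rows.map pvKeptCorr) ir.1).getD []))

def pvSelB (qs gs : List String) (rows : List (List String × List Int × List Int)) :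
    List String × List String × List (List String) × List (List Int) :=
  let Z := (qs.zip (gs.zip rows)).filter (fun z => pvMixedRow z.2.2)
  (Z.map (fun z => z.1), Z.map (fun z => z.2.1),
   Z.map (fun z => pvKeptTexts z.2.2), Z.map (fun z => pvKeptCorr z.2.2))

-- one cons step of the index-based selection
theorem pv_step {α : Type} (r : List String × List Int × List Int)
    (rs : List (List String × List Int × List Int)) (x : α) (xs : List α) (d : α) :
    ((((0 : Int), r) :: (PySem.List.enumerate rs 0).map (fun p => (p.1 + 1, p.2))).filter
        (fun ir => pvMixedRow ir.2)).map (fun ir => (PySem.List.pyGet? (x :: xs) ir.1).getD d)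
    = (if pvMixedRow r then [x] else [])
      ++ ((PySem.List.enumerate rs 0).filter (fun ir => pvMixedRow ir.2)).map
          (fun ir => (PySem.List.pyGet? xs ir.1).getD d) := by
  rw [List.filter_cons, List.filter_map]
  have htail : ((PySem.List.enumerate rs 0).filter
        ((fun (ir : Int × (List String × List Int × List Int)) => pvMixedRow ir.2) ∘
          (fun p => (p.1 + 1, p.2)))).map
        ((fun ir => (PySem.List.pyGet? (x :: xs) ir.1).getD d) ∘ (fun (p : Int × _) => (p.1 + 1, p.2)))
      = ((PySem.List.enumerate rs 0).filter (fun ir => pvMixedRow ir.2)).map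
          (fun ir => (PySem.List.pyGet? xs ir.1).getD d) := by
    apply List.map_congr_left
    intro p hp
    obtain ⟨k, hk⟩ := pv_enum_fst_nat rs p (List.mem_of_mem_filter hp)
    simp only [Function.comp_apply]
    rw [hk, PySem.List.pyGet?_cons_succ]
  cases hm : pvMixedRow r with
  | true =>
    simp only [hm, if_pos, List.map_cons, List.map_map, List.singleton_append]
    rw [PySem.List.pyGet?_zero_cons, Option.getD_some]
    exact congrArg _ htail
  | false =>
    simp only [hm, Bool.false_eq_true, if_neg, not_false_iff, List.map_map]
    simpa using htail

-- the master lemma: index-based selection = zip-based selection, given that no mixed row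
-- lies beyond min(|qs|, |gs|)
theorem pv_master (rows : List (List String × List Int × List Int)) :
    ∀ (qs gs : List String),
      ((rows.drop (min qs.length gs.length)).all (fun r => !pvMixedRow r)) = true →
      pvSelA rows qs gs = pvSelB qs gs rows := by
  induction rows with
  | nil => intro qs gs _; simp [pvSelA, pvSelB, PySem.List.enumerate]
  | cons r rs ih =>
    intro qs gs hall
    cases qs with
    | nil =>
      simp only [List.length_nil, Nat.zero_min, List.drop_zero] at hall
      have hnone : ((PySem.List.enumerate (r :: rs) 0).filter (fun ir => pvMixedRow ir.2)) = [] := by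
        rw [List.filter_eq_nil_iff]
        intro ir hir
        rw [PySem.List.mem_enumerate_iff] at hir
        obtain ⟨k, hk, rfl⟩ := hir
        have := List.all_eq_true.mp hall _ (List.getElem_mem hk)
        simp_all
      simp only [pvSelA, pvSelB]
      rw [hnone]
      simp
    | cons q qs' =>
      cases gs with
      | nil =>
        simp only [List.length_nil, Nat.min_zero, List.drop_zero] at hall
        have hnone : ((PySem.List.enumerate (r :: rs) 0).filter (fun ir => pvMixedRow ir.2)) = [] := by
          rw [List.filter_eq_nil_iff]
          intro ir hir
          rw [PySem.List.mem_enumerate_iff] at hir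
          obtain ⟨k, hk, rfl⟩ := hir
          have := List.all_eq_true.mp hall _ (List.getElem_mem hk)
          simp_all
        simp only [pvSelA, pvSelB]
        rw [hnone]
        simp [List.zip_nil_right]
      | cons g gs' =>
        have hall' : ((rs.drop (min qs'.length gs'.length)).all (fun r => !pvMixedRow r)) = true := by
          simpa [Nat.succ_min_succ] using hall
        have ihr := ih qs' gs' hall'
        have hshift : PySem.List.enumerate (r :: rs) 0
            = ((0 : Int), r) :: (PySem.List.enumerate rs 0).map (fun p => (p.1 + 1, p.2)) := by
          rw [PySem.List.enumerate_cons, pv_enumerate_shift rs (0 + 1)]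
          norm_num
        simp only [pvSelA, pvSelB, Prod.mk.injEq] at ihr
        obtain ⟨e1, e2, e3, e4⟩ := ihr
        simp only [pvSelA, pvSelB, hshift, Prod.mk.injEq]
        refine ⟨?_, ?_, ?_, ?_⟩
        · rw [pv_step r rs q qs' ""]
          simp only [List.zip_cons_cons, List.filter_cons]
          cases hm : pvMixedRow r <;> simp [hm, e1]
        · rw [pv_step r rs g gs' ""]
          simp only [List.zip_cons_cons, List.filter_cons]
          cases hm : pvMixedRow r <;> simp [hm, e2]
        · rw [List.map_cons, pv_step r rs (pvKeptTexts r) (rs.map pvKeptTexts) []]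
          simp only [List.zip_cons_cons, List.filter_cons]
          cases hm : pvMixedRow r <;> simp [hm, e3]
        · rw [List.map_cons, pv_step r rs (pvKeptCorr r) (rs.map pvKeptCorr) []]
          simp only [List.zip_cons_cons, List.filter_cons]
          cases hm : pvMixedRow r <;> simp [hm, e4]

-- B's foldl is pvSelB
theorem pv_bfold_eq (Z : List (String × String × List String × List Int × List Int))
    (acc : List String × List String × List (List String) × List (List Int)) :
    Z.foldl
      (fun (acc : List String × List String × List (List String) × List (List Int))
           (row : String × String × List String × List Int × List Int) =>
        let kept :=
          (row.2.2.1.zip (row.2.2.2.1.zip row.2.2.2.2)).filter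
            (fun tfc => decide (tfc.2.2 ≠ -1 ∧ ¬(tfc.2.1 = 0 ∧ tfc.2.2 = 1)))
        let new_corr := kept.map (fun tc => tc.2.2)
        if (0 : Int) ∈ new_corr ∧ (1 : Int) ∈ new_corr then
          (acc.1 ++ [row.1], acc.2.1 ++ [row.2.1],
           acc.2.2.1 ++ [kept.map (fun tc => tc.1)], acc.2.2.2 ++ [new_corr])
        else acc) acc
    = (acc.1 ++ (Z.filter (fun z => pvMixedRow z.2.2)).map (fun z => z.1),
       acc.2.1 ++ (Z.filter (fun z => pvMixedRow z.2.2)).map (fun z => z.2.1),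
       acc.2.2.1 ++ (Z.filter (fun z => pvMixedRow z.2.2)).map (fun z => pvKeptTexts z.2.2),
       acc.2.2.2 ++ (Z.filter (fun z => pvMixedRow z.2.2)).map (fun z => pvKeptCorr z.2.2)) := by
  induction Z generalizing acc with
  | nil => simp
  | cons z zs ih =>
    simp only [List.foldl_cons, List.filter_cons]
    have hk : ((z.2.2.1.zip (z.2.2.2.1.zip z.2.2.2.2)).filter
        (fun tfc => decide (tfc.2.2 ≠ -1 ∧ ¬(tfc.2.1 = 0 ∧ tfc.2.2 = 1)))).map
        (fun tc => tc.2.2) = pvKeptCorr z.2.2 := rfl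
    have ht : ((z.2.2.1.zip (z.2.2.2.1.zip z.2.2.2.2)).filter
        (fun tfc => decide (tfc.2.2 ≠ -1 ∧ ¬(tfc.2.1 = 0 ∧ tfc.2.2 = 1)))).map
        (fun tc => tc.1) = pvKeptTexts z.2.2 := rfl
    by_cases h : (0 : Int) ∈ pvKeptCorr z.2.2 ∧ (1 : Int) ∈ pvKeptCorr z.2.2
    · have hm : pvMixedRow z.2.2 = true := by simp [pvMixedRow, h]
      rw [show (if (0 : Int) ∈ ((z.2.2.1.zip (z.2.2.2.1.zip z.2.2.2.2)).filter
            (fun tfc => decide (tfc.2.2 ≠ -1 ∧ ¬(tfc.2.1 = 0 ∧ tfc.2.2 = 1)))).map (fun tc => tc.2.2) ∧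
            (1 : Int) ∈ ((z.2.2.1.zip (z.2.2.2.1.zip z.2.2.2.2)).filter
            (fun tfc => decide (tfc.2.2 ≠ -1 ∧ ¬(tfc.2.1 = 0 ∧ tfc.2.2 = 1)))).map (fun tc => tc.2.2)
          then (acc.1 ++ [z.1], acc.2.1 ++ [z.2.1],
            acc.2.2.1 ++ [((z.2.2.1.zip (z.2.2.2.1.zip z.2.2.2.2)).filter
              (fun tfc => decide (tfc.2.2 ≠ -1 ∧ ¬(tfc.2.1 = 0 ∧ tfc.2.2 = 1)))).map (fun tc => tc.1)],
            acc.2.2.2 ++ [((z.2.2.1.zip (z.2.2.2.1.zip z.2.2.2.2)).filter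
              (fun tfc => decide (tfc.2.2 ≠ -1 ∧ ¬(tfc.2.1 = 0 ∧ tfc.2.2 = 1)))).map (fun tc => tc.2.2)])
          else acc)
          = (acc.1 ++ [z.1], acc.2.1 ++ [z.2.1], acc.2.2.1 ++ [pvKeptTexts z.2.2],
             acc.2.2.2 ++ [pvKeptCorr z.2.2]) from by rw [hk, ht, if_pos h]]
      rw [ih, hm]
      simp [List.append_assoc]
    · have hm : pvMixedRow z.2.2 = false := by simp [pvMixedRow]; tauto
      rw [show (if (0 : Int) ∈ ((z.2.2.1.zip (z.2.2.2.1.zip z.2.2.2.2)).filter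
            (fun tfc => decide (tfc.2.2 ≠ -1 ∧ ¬(tfc.2.1 = 0 ∧ tfc.2.2 = 1)))).map (fun tc => tc.2.2) ∧
            (1 : Int) ∈ ((z.2.2.1.zip (z.2.2.2.1.zip z.2.2.2.2)).filter
            (fun tfc => decide (tfc.2.2 ≠ -1 ∧ ¬(tfc.2.1 = 0 ∧ tfc.2.2 = 1)))).map (fun tc => tc.2.2)
          then (acc.1 ++ [z.1], acc.2.1 ++ [z.2.1],
            acc.2.2.1 ++ [((z.2.2.1.zip (z.2.2.2.1.zip z.2.2.2.2)).filter
              (fun tfc => decide (tfc.2.2 ≠ -1 ∧ ¬(tfc.2.1 = 0 ∧ tfc.2.2 = 1)))).map (fun tc => tc.1)],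
            acc.2.2.2 ++ [((z.2.2.1.zip (z.2.2.2.1.zip z.2.2.2.2)).filter
              (fun tfc => decide (tfc.2.2 ≠ -1 ∧ ¬(tfc.2.1 = 0 ∧ tfc.2.2 = 1)))).map (fun tc => tc.2.2)])
          else acc) = acc from by rw [hk, if_neg h]]
      rw [ih, hm]
      simp

-- ===== VERDICT (by name: the statement is the Claim_ definition above) =====
theorem filter_and_select_mixed_spec : Claim_equal_filter_and_select_mixed := by
  intro questions gold_answers candidate_texts candidate_valid_flags correctness _ hpre
  unfold Pre_filter_and_select_mixed at hpre
  unfold Spec_filter_and_select_mixed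
  have hB : filter_and_select_mixed_alt questions gold_answers candidate_texts candidate_valid_flags correctness
      = pvSelB questions gold_answers (candidate_texts.zip (candidate_valid_flags.zip correctness)) := by
    unfold filter_and_select_mixed_alt
    rw [pv_bfold_eq]
    simp [pvSelB]
  have hA : filter_and_select_mixed questions gold_answers candidate_texts candidate_valid_flags correctness
      = pvSelA (candidate_texts.zip (candidate_valid_flags.zip correctness)) questions gold_answers := by
    unfold filter_and_select_mixed
    rw [pv_outer_eq]
    simp only [List.nil_append]
    rw [pv_mixedfold]
    by_cases hidx : (((PySem.List.enumerate (candidate_texts.zip (candidate_valid_flags.zip correctness)) 0).filter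
        (fun ir => pvMixedRow ir.2)).map (fun ir => ir.1)) = []
    · rw [if_pos hidx]
      have hsel := List.map_eq_nil_iff.mp hidx
      simp [pvSelA, hsel]
    · rw [if_neg hidx]
      simp [pvSelA, List.map_map, Function.comp]
  rw [hA, hB]
  exact pv_master _ questions gold_answers hpre
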